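-- pv_equiv track=rewrite | github.com/Edu-0/sandbox | abstract_math_calc/gf_operations.py | gf2_mul
-- ===== SOURCE A (Python) =====
-- def gf2_mul(f, g):  # This function had 0xFF, 0x80 and Overflow because here it doesn't matter if it goes beyond x^8
--     result = 0
--     for i in range(8):
--         if (g >> i) & 1:
--             temp = f
--             for _ in range(i):
--                 temp = temp << 1
--
--             result ^= temp
--     return result
-- ===== SOURCE B (Python) =====
-- def gf2_mul(f, g):
--     # shift-and-add carryless multiply: thread a running shifted f and consumed g
--     result = 0
--     for _ in range(8):
--         if g & 1:
--             result ^= f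
--         f <<= 1
--         g >>= 1
--     return result
-- ===== Notes on version B (the rewrite author's own statement) =====
-- stated objective: simpler
-- what changed: Replaces the nested inner loop that recomputes f<<i from scratch each iteration by the standard shift-and-add scheme that threads a running shifted f and right-shifted g through one flat 8-step loop.
import Mathlib
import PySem

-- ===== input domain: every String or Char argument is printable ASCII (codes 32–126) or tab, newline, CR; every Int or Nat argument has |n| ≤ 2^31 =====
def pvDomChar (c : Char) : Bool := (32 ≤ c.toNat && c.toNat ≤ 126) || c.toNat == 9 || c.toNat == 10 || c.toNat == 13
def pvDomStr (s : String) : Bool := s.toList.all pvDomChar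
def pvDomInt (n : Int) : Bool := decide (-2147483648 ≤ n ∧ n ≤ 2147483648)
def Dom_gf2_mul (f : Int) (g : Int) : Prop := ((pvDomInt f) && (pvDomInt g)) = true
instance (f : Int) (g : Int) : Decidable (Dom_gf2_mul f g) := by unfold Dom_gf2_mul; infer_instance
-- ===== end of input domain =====

-- B replaces A's nested loop (recomputing f<<i from scratch per set bit) by the flat
-- shift-and-add scheme threading a running shifted f and consumed g; objective: simpler.

-- ===== PORT A =====
-- for i in range(8): if (g >> i) & 1: temp = f; for _ in range(i): temp <<= 1; result ^= temp
def gf2_mul (f : Int) (g : Int) : Int :=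
  (List.range 8).foldl (fun (result : Int) (i : Nat) =>
    if PySem.Int.band (g >>> i) 1 ≠ 0 then
      PySem.Int.bxor result ((List.range i).foldl (fun (temp : Int) _ => temp <<< (1:Nat)) f)
    else result) (0:Int)

-- ===== PORT B =====
-- for _ in range(8): if g & 1: result ^= f; f <<= 1; g >>= 1
def gf2_mul_alt (f : Int) (g : Int) : Int :=
  ((List.range 8).foldl (fun (s : Int × Int × Int) _ =>
      (if PySem.Int.band s.2.2 1 ≠ 0 then PySem.Int.bxor s.1 s.2.1 else s.1, s.2.1 <<< (1:Nat), s.2.2 >>> (1:Nat)))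
    (0, f, g)).1

-- ===== PRECONDITION & SPEC =====
def Spec_gf2_mul (f : Int) (g : Int) (out : Int) : Prop := out = gf2_mul_alt f g
instance (f : Int) (g : Int) (out : Int) : Decidable (Spec_gf2_mul f g out) := by unfold Spec_gf2_mul; infer_instance

-- ===== CLAIM (what is proved, stated in full; the proofs are below) =====
def Claim_equal_gf2_mul : Prop := ∀ (f : Int) (g : Int), Dom_gf2_mul f g → Spec_gf2_mul f g (gf2_mul f g)

-- ===== LEMMAS AND PROOFS =====

-- A's inner loop computes f <<< i
lemma gf2_inner_shl (f : Int) (i : Nat) :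
    (List.range i).foldl (fun (temp : Int) _ => temp <<< (1:Nat)) f = f <<< i := by
  induction i with
  | zero => simp
  | succ n ih =>
      rw [List.range_succ, List.foldl_append, ih]
      simp [Int.shiftLeft_eq, pow_succ]; ring

-- B's loop state after n steps: A's partial result so far, f shifted left n, g shifted right n
lemma gf2_state (f g : Int) (n : Nat) :
    (List.range n).foldl (fun (s : Int × Int × Int) _ =>
        (if PySem.Int.band s.2.2 1 ≠ 0 then PySem.Int.bxor s.1 s.2.1 else s.1, s.2.1 <<< (1:Nat), s.2.2 >>> (1:Nat)))
      (0, f, g) =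
    ((List.range n).foldl (fun (result : Int) (i : Nat) =>
        if PySem.Int.band (g >>> i) 1 ≠ 0 then
          PySem.Int.bxor result ((List.range i).foldl (fun (temp : Int) _ => temp <<< (1:Nat)) f)
        else result) (0:Int), f <<< n, g >>> n) := by
  induction n with
  | zero => simp
  | succ n ih =>
      rw [List.range_succ, List.foldl_append, List.foldl_append, ih]
      simp only [List.foldl_cons, List.foldl_nil]
      refine Prod.ext ?_ (Prod.ext ?_ ?_)
      · simp [gf2_inner_shl]
      · simp only [Int.shiftLeft_eq]; ring
      · simpa using (Int.shiftRight_add g n 1).symm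

-- ===== VERDICT (by name: the statement is the Claim_ definition above) =====
theorem gf2_mul_spec : Claim_equal_gf2_mul := by
  intro f g _
  unfold Spec_gf2_mul gf2_mul gf2_mul_alt
  rw [gf2_state]
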